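-- pv_equiv track=rewrite | github.com/representantes-fic/comparar_guias_docentes | comparar.py | agrupar_comparacion
-- ===== SOURCE A (Python) =====
-- def agrupar_comparacion(lineas: list) -> list[tuple]:
-- 	# Lista de tuplas de liñas, as tuplas conteñen o antes e o despois.
-- 	lista_cambios = []
-- 	actual = ([], [])
-- 	for linea in lineas:
-- 		if linea[0] == '+':
-- 			actual[0].append('')
-- 			actual[1].append(linea)
-- 		elif linea[0] == '-':
-- 			actual[0].append(linea)
-- 			actual[1].append('')
-- 		else:
-- 			if len(actual[0]) > 0:
-- 				lista_cambios.append(actual)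
-- 				actual = ([], [])
-- 	return lista_cambios
-- ===== SOURCE B (Python) =====
-- def agrupar_comparacion(lineas: list) -> list[tuple]:
--     # Split the input into maximal runs of change-lines ('+'/'-') and build each
--     # block at once with comprehensions; a run is a block only when it is followed
--     # by a context line (A flushes only on a context line).
--     res = []
--     i, n = 0, len(lineas)
--     while i < n:
--         if lineas[i][0] in '+-':
--             j = i
--             while j < n and lineas[j][0] in '+-':
--                 j += 1
--             if j < n:  # the run is closed by a context line
--                 run = lineas[i:j]
--                 res.append(([x if x[0] == '-' else '' for x in run],
--                             [x if x[0] == '+' else '' for x in run]))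
--             i = j
--         else:
--             i += 1
--     return res
-- ===== Notes on version B (the rewrite author's own statement) =====
-- stated objective: alternative
-- what changed: B splits the input into maximal runs of change-lines and emits each context-terminated run as a whole block with two comprehensions, instead of A's per-line state machine that mutates a pending pair of lists and flushes it on context lines.
import Mathlib
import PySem

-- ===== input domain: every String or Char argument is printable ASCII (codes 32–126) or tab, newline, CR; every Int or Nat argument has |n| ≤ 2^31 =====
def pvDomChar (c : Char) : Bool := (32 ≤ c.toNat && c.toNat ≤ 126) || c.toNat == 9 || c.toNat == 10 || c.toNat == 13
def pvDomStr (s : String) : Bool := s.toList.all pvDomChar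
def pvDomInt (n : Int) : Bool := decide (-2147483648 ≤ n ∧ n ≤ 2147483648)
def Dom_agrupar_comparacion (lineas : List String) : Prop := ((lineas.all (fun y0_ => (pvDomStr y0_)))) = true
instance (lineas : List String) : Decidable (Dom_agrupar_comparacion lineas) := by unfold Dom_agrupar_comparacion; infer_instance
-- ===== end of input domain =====

-- B groups the input into maximal runs of change-lines and emits each context-terminated
-- run as a whole block built with two maps, instead of A's per-line state machine
-- mutating a pending pair; same cost, different decomposition.

-- ===== PORT A =====
-- A's loop body: mutate the pending pair on '+'/'-', flush it on a context line.
def aStep (st : List (List String × List String) × (List String × List String))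
    (linea : String) : List (List String × List String) × (List String × List String) :=
  if PySem.Str.pyGet? linea 0 = some '+' then
    (st.1, (st.2.1 ++ [""], st.2.2 ++ [linea]))
  else if PySem.Str.pyGet? linea 0 = some '-' then
    (st.1, (st.2.1 ++ [linea], st.2.2 ++ [""]))
  else
    if st.2.1.length > 0 then (st.1 ++ [st.2], ([], [])) else st

def agrupar_comparacion (lineas : List String) : List (List String × List String) :=
  (lineas.foldl aStep ([], ([], []))).1

-- ===== PORT B =====
def altIsChange (l : String) : Bool :=
  PySem.Str.pyGet? l 0 == some '+' || PySem.Str.pyGet? l 0 == some '-'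

def altBlock (run : List String) : List String × List String :=
  (run.map (fun x => if PySem.Str.pyGet? x 0 = some '-' then x else ""),
   run.map (fun x => if PySem.Str.pyGet? x 0 = some '+' then x else ""))

-- B's outer while loop: skip context lines; on a change line take the maximal change run
-- (the inner while loop: takeWhile/dropWhile), emit its block if the run is closed by a
-- context line (j < n, i.e. the rest is nonempty), continue after the run.
def altGo : List String → List (List String × List String)
  | [] => []
  | l :: ls =>
    if h : altIsChange l then
      (if (l :: ls).dropWhile altIsChange = [] then []
       else [altBlock ((l :: ls).takeWhile altIsChange)]) ++
        altGo ((l :: ls).dropWhile altIsChange)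
    else
      altGo ls
termination_by ls => ls.length
decreasing_by
  · have h1 : List.dropWhile altIsChange (l :: ls) = List.dropWhile altIsChange ls := by
      simp [h]
    rw [h1]
    have := List.length_dropWhile_le altIsChange ls
    simp only [List.length_cons]
    omega
  · simp

def agrupar_comparacion_alt (lineas : List String) : List (List String × List String) :=
  altGo lineas

-- ===== PRECONDITION & SPEC =====
-- Pre_ excludes inputs containing an empty line: there Python A (and Python B) raise
-- IndexError on linea[0].
def Pre_agrupar_comparacion (lineas : List String) : Prop := ∀ l ∈ lineas, l ≠ ""
instance (lineas : List String) : Decidable (Pre_agrupar_comparacion lineas) := by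
  unfold Pre_agrupar_comparacion; infer_instance

def pvWitness_agrupar_comparacion : List String := ["-a", "+b", " c"]

def Spec_agrupar_comparacion (lineas : List String) (out : List (List String × List String)) : Prop :=
  out = agrupar_comparacion_alt lineas
instance (lineas : List String) (out : List (List String × List String)) : Decidable (Spec_agrupar_comparacion lineas out) := by
  unfold Spec_agrupar_comparacion; infer_instance

-- ===== CLAIM =====
def Claim_equal_agrupar_comparacion : Prop := ∀ (lineas : List String), Dom_agrupar_comparacion lineas → Pre_agrupar_comparacion lineas → Spec_agrupar_comparacion lineas (agrupar_comparacion lineas)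

-- ===== LEMMAS AND PROOFS =====

theorem isChange_plus (l : String) (hp : PySem.List.pyGet? l.toList 0 = some '+') :
    altIsChange l = true := by simp [altIsChange, PySem.Str.pyGet?, hp]

theorem isChange_minus (l : String) (hm : PySem.List.pyGet? l.toList 0 = some '-') :
    altIsChange l = true := by simp [altIsChange, PySem.Str.pyGet?, hm]

theorem isChange_ctx (l : String) (hp : ¬ PySem.List.pyGet? l.toList 0 = some '+')
    (hm : ¬ PySem.List.pyGet? l.toList 0 = some '-') : altIsChange l = false := by
  simp [altIsChange, PySem.Str.pyGet?, hp, hm]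

theorem altBlock_plus (run : List String) (l : String)
    (hp : PySem.List.pyGet? l.toList 0 = some '+') :
    altBlock (run ++ [l]) = ((altBlock run).1 ++ [""], (altBlock run).2 ++ [l]) := by
  simp [altBlock, PySem.Str.pyGet?, hp]

theorem altBlock_minus (run : List String) (l : String)
    (hm : PySem.List.pyGet? l.toList 0 = some '-') :
    altBlock (run ++ [l]) = ((altBlock run).1 ++ [l], (altBlock run).2 ++ [""]) := by
  simp [altBlock, PySem.Str.pyGet?, hm]

theorem aStep_plus (st : List (List String × List String) × (List String × List String))
    (l : String) (hp : PySem.List.pyGet? l.toList 0 = some '+') :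
    aStep st l = (st.1, (st.2.1 ++ [""], st.2.2 ++ [l])) := by
  simp [aStep, PySem.Str.pyGet?, hp]

theorem aStep_minus (st : List (List String × List String) × (List String × List String))
    (l : String) (hp : ¬ PySem.List.pyGet? l.toList 0 = some '+')
    (hm : PySem.List.pyGet? l.toList 0 = some '-') :
    aStep st l = (st.1, (st.2.1 ++ [l], st.2.2 ++ [""])) := by
  simp [aStep, PySem.Str.pyGet?, hm]

theorem aStep_ctx (st : List (List String × List String) × (List String × List String))
    (l : String) (hp : ¬ PySem.List.pyGet? l.toList 0 = some '+')
    (hm : ¬ PySem.List.pyGet? l.toList 0 = some '-') :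
    aStep st l = if st.2.1.length > 0 then (st.1 ++ [st.2], ([], [])) else st := by
  simp [aStep, PySem.Str.pyGet?, hp, hm]

-- Characterisation G of A's fold: the pending run as an explicit list of lines.
def pvG : List String → List String → List (List String × List String)
  | _run, [] => []
  | run, l :: ls =>
    if altIsChange l then pvG (run ++ [l]) ls
    else (if run = [] then [] else [altBlock run]) ++ pvG [] ls

theorem foldl_eq_pvG (ls : List String) :
    ∀ (lc : List (List String × List String)) (run : List String),
    (ls.foldl aStep (lc, altBlock run)).1 = lc ++ pvG run ls := by
  induction ls with
  | nil => intro lc run; simp [pvG]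
  | cons l ls ih =>
    intro lc run
    rw [List.foldl_cons]
    by_cases hp : PySem.List.pyGet? l.toList 0 = some '+'
    · rw [aStep_plus _ _ hp]
      rw [show ((lc, ((altBlock run).1 ++ [""], (altBlock run).2 ++ [l])) :
            List (List String × List String) × (List String × List String))
          = (lc, altBlock (run ++ [l])) by rw [altBlock_plus run l hp]]
      rw [ih lc (run ++ [l])]
      simp [pvG, isChange_plus l hp]
    · by_cases hm : PySem.List.pyGet? l.toList 0 = some '-'
      · rw [aStep_minus _ _ hp hm]
        rw [show ((lc, ((altBlock run).1 ++ [l], (altBlock run).2 ++ [""])) :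
              List (List String × List String) × (List String × List String))
            = (lc, altBlock (run ++ [l])) by rw [altBlock_minus run l hm]]
        rw [ih lc (run ++ [l])]
        simp [pvG, isChange_minus l hm]
      · rw [aStep_ctx _ _ hp hm]
        have hc := isChange_ctx l hp hm
        by_cases hr : run = []
        · subst hr
          simp only [altBlock, List.map_nil, List.length_nil]
          rw [if_neg (by omega)]
          rw [show (([], []) : List String × List String) = altBlock [] from rfl] at *
          rw [ih lc []]
          simp [pvG, hc]
        · have hlen : (altBlock run).1.length > 0 := by
            simp only [altBlock]
            simpa using List.length_pos_iff.mpr hr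
          rw [if_pos hlen]
          rw [show (([], []) : List String × List String) = altBlock [] from rfl]
          rw [ih (lc ++ [altBlock run]) []]
          simp [pvG, hc, hr]

theorem A_eq_pvG (lineas : List String) : agrupar_comparacion lineas = pvG [] lineas := by
  have := foldl_eq_pvG lineas [] []
  simpa [agrupar_comparacion, altBlock] using this

theorem takeWhile_append_not (run : List String) (l : String) (tl : List String)
    (hrun : ∀ x ∈ run, altIsChange x = true) (hl : altIsChange l = false) :
    (run ++ l :: tl).takeWhile altIsChange = run ∧
    (run ++ l :: tl).dropWhile altIsChange = l :: tl := by
  induction run with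
  | nil => simp [hl]
  | cons r rs ih =>
    have hr : altIsChange r = true := hrun r (by simp)
    have := ih (fun x hx => hrun x (by simp [hx]))
    simp [hr, this.1, this.2]

-- altGo on a change run closed by a context line flushes exactly that block.
theorem altGo_split (run : List String) (l : String) (tl : List String)
    (hrun : ∀ x ∈ run, altIsChange x = true) (hl : altIsChange l = false) :
    altGo (run ++ l :: tl) = (if run = [] then [] else [altBlock run]) ++ altGo tl := by
  cases run with
  | nil => simp [altGo, hl]
  | cons r rs =>
    have hr : altIsChange r = true := hrun r (by simp)
    have hsplit := takeWhile_append_not (r :: rs) l tl hrun hl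
    rw [show (r :: rs) ++ l :: tl = r :: (rs ++ l :: tl) by simp]
    rw [altGo]
    simp only [hr, dif_pos, reduceCtorEq]
    rw [show r :: (rs ++ l :: tl) = (r :: rs) ++ l :: tl by simp]
    rw [hsplit.1, hsplit.2]
    simp [altGo, hl]

theorem pvG_eq_altGo (ls : List String) :
    ∀ run, (∀ x ∈ run, altIsChange x = true) →
    pvG run ls = altGo (run ++ ls) := by
  induction ls with
  | nil =>
    intro run hrun
    cases run with
    | nil => simp [pvG, altGo]
    | cons r rs =>
      have hr : altIsChange r = true := hrun r (by simp)
      have hdw : (r :: rs).dropWhile altIsChange = [] := by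
        apply List.dropWhile_eq_nil_iff.mpr; intro x hx; exact hrun x hx
      rw [show (r :: rs) ++ ([] : List String) = r :: rs by simp]
      rw [pvG, altGo]
      simp [hr, hdw, altGo]
  | cons l tl ih =>
    intro run hrun
    by_cases hc : altIsChange l = true
    · have := ih (run ++ [l])
        (by intro x hx
            rcases List.mem_append.mp hx with h | h
            · exact hrun x h
            · simp at h; subst h; exact hc)
      rw [pvG]; simp only [hc, if_true]
      rw [this]; simp
    · have hc' : altIsChange l = false := by simpa using hc
      rw [pvG]; simp only [hc', Bool.false_eq_true, if_false]
      rw [altGo_split run l tl hrun hc']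
      congr 1
      have := ih [] (by intro x hx; simp at hx)
      simpa using this

-- ===== VERDICT =====
theorem agrupar_comparacion_spec : Claim_equal_agrupar_comparacion := by
  intro lineas _hdom _hpre
  show agrupar_comparacion lineas = agrupar_comparacion_alt lineas
  rw [A_eq_pvG, agrupar_comparacion_alt]
  have := pvG_eq_altGo lineas [] (by intro x hx; simp at hx)
  simpa using this
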